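-- pv_equiv track=rewrite | github.com/explosion/spacy-transformers | spacy_transformers/_tokenizers.py | fix_alignment
-- ===== SOURCE A (Python) =====
-- def fix_alignment(segments):
--     """Turn a nested segment alignment into an alignment for the whole input,
--     by offsetting and accounting for special tokens."""
--     offset = 0
--     output = []
--     for segment in segments:
--         if segment:
--             offset += 1
--         seen = set()
--         for idx_group in segment:
--             output.append([idx + offset for idx in idx_group])
--             seen.update({idx for idx in idx_group})
--         offset += len(seen)
--         if segment:
--             offset += 1
--     return output
-- ===== SOURCE B (Python) =====
-- def fix_alignment(segments):
--     """Turn a nested segment alignment into an alignment for the whole input,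
--     by offsetting and accounting for special tokens."""
--     bases = []
--     offset = 0
--     for segment in segments:
--         bases.append(offset + 1)
--         if segment:
--             distinct = set()
--             for group in segment:
--                 distinct.update(group)
--             offset += 2 + len(distinct)
--     return [[idx + base for idx in group]
--             for base, segment in zip(bases, segments)
--             for group in segment]
-- ===== Notes on version B (the rewrite author's own statement) =====
-- stated objective: alternative
-- what changed: Replaces A's single accumulator-threaded pass (offset mutated before, during and after each segment's emission loop) with a table-then-map decomposition: a first pass precomputes each segment's base offset, then a flat comprehension emits all shifted groups.
import Mathlib
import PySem

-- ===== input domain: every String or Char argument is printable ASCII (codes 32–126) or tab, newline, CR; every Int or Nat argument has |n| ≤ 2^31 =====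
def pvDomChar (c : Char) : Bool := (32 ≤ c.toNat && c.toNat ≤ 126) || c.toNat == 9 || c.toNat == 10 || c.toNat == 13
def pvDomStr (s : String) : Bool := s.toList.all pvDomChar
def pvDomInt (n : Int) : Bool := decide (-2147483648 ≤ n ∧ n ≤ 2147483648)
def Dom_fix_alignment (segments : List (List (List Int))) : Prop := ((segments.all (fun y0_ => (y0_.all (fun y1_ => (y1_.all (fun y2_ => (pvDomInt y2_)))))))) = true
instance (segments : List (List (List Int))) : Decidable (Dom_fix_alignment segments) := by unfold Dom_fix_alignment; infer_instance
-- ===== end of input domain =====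

-- B replaces A's accumulator-threaded single pass by a table-then-map decomposition
-- (precompute per-segment base offsets, then emit by a flat comprehension); objective: alternative.

-- ===== PORT A =====
-- Port of A: one foldl over segments threading (offset, output); inner foldl over
-- idx_groups threading (seen : PySem.Set Int, output), as in the Python.
def fix_alignment (segments : List (List (List Int))) : List (List Int) :=
  (segments.foldl (fun (st : Int × List (List Int)) segment =>
    let offset := if segment ≠ [] then st.1 + 1 else st.1
    let inner := segment.foldl
      (fun (st2 : PySem.Set Int × List (List Int)) idx_group =>
        (PySem.Set.update st2.1 (PySem.Set.ofList idx_group),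
         st2.2 ++ [idx_group.map (fun idx => idx + offset)]))
      (PySem.Set.empty, st.2)
    let offset := offset + (PySem.Set.len inner.1 : Int)
    let offset := if segment ≠ [] then offset + 1 else offset
    (offset, inner.2)) ((0 : Int), ([] : List (List Int)))).2

-- ===== PORT B =====
-- Port of B: first pass builds the per-segment base-offset table, second pass is a
-- flat comprehension over zip(bases, segments).
def altDistinct (segment : List (List Int)) : Int :=
  PySem.Set.len (segment.foldl (fun (s : PySem.Set Int) group => PySem.Set.update s group)
    PySem.Set.empty)

def altBases : List (List (List Int)) → Int → List Int
  | [], _ => []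
  | segment :: rest, offset =>
      (offset + 1) ::
        altBases rest (if segment ≠ [] then offset + 2 + altDistinct segment else offset)

def fix_alignment_alt (segments : List (List (List Int))) : List (List Int) :=
  ((altBases segments 0).zip segments).flatMap
    (fun p => p.2.map (fun group => group.map (fun idx => idx + p.1)))

-- ===== PRECONDITION & SPEC =====
def Spec_fix_alignment (segments : List (List (List Int))) (out : List (List Int)) : Prop := out = fix_alignment_alt segments
instance (segments : List (List (List Int))) (out : List (List Int)) : Decidable (Spec_fix_alignment segments out) := by unfold Spec_fix_alignment; infer_instance

-- ===== CLAIM (what is proved, stated in full; the proofs are below) =====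
def Claim_equal_fix_alignment : Prop := ∀ (segments : List (List (List Int))), Dom_fix_alignment segments → Spec_fix_alignment segments (fix_alignment segments)

-- ===== LEMMAS AND PROOFS =====

-- folding `add` of a deduplicated list into s equals folding the raw list
lemma update_ofList (g : List Int) (s : PySem.Set Int) :
    PySem.Set.update s (PySem.Set.ofList g) = PySem.Set.update s g := by
  rw [PySem.Set.update_eq_append_filter, PySem.Set.update_eq_append_filter,
    PySem.Set.ofList_ofList]

-- A's inner loop over a segment, split into its two components
lemma inner_eq (seg : List (List Int)) (s : PySem.Set Int) (out : List (List Int))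
    (f : Int → Int) :
    seg.foldl (fun (st2 : PySem.Set Int × List (List Int)) idx_group =>
        (PySem.Set.update st2.1 (PySem.Set.ofList idx_group),
         st2.2 ++ [idx_group.map f])) (s, out)
    = (seg.foldl (fun s g => PySem.Set.update s g) s,
       out ++ seg.map (fun g => g.map f)) := by
  induction seg generalizing s out with
  | nil => simp
  | cons g rest ih =>
    rw [List.foldl_cons, ih]
    simp [update_ofList]

-- A's outer loop produces exactly B's table-then-map output, for any start state
lemma main_eq (segments : List (List (List Int))) (off : Int) (out : List (List Int)) :
    (segments.foldl (fun (st : Int × List (List Int)) segment =>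
      let offset := if segment ≠ [] then st.1 + 1 else st.1
      let inner := segment.foldl
        (fun (st2 : PySem.Set Int × List (List Int)) idx_group =>
          (PySem.Set.update st2.1 (PySem.Set.ofList idx_group),
           st2.2 ++ [idx_group.map (fun idx => idx + offset)]))
        (PySem.Set.empty, st.2)
      let offset := offset + (PySem.Set.len inner.1 : Int)
      let offset := if segment ≠ [] then offset + 1 else offset
      (offset, inner.2)) (off, out)).2
    = out ++ ((altBases segments off).zip segments).flatMap
        (fun p => p.2.map (fun group => group.map (fun idx => idx + p.1))) := by
  induction segments generalizing off out with
  | nil => simp [altBases]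
  | cons seg rest ih =>
    simp only [List.foldl_cons, altBases, List.zip_cons_cons, List.flatMap_cons]
    rw [inner_eq]
    by_cases h : seg = []
    · subst h
      simpa using ih off out
    · simp only [h, if_pos, ne_eq, not_false_iff]
      rw [ih]
      have : off + 1 + PySem.Set.len (List.foldl (fun s g => PySem.Set.update s g)
          PySem.Set.empty seg) + 1 = off + 2 + altDistinct seg := by
        unfold altDistinct; ring
      rw [this, List.append_assoc]

-- ===== VERDICT (by name: the statement is the Claim_ definition above) =====
theorem fix_alignment_spec : Claim_equal_fix_alignment := by
  intro segments _
  unfold Spec_fix_alignment fix_alignment fix_alignment_alt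
  simpa using main_eq segments 0 []
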